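-- pv_equiv track=rewrite | github.com/py-lidbox/lidbox | speechbox/datasets/walkers.py | phone_segmentation_to_words
-- ===== SOURCE A (Python) =====
-- def phone_segmentation_to_words(phoneseg):
--     word_boundaries = {'.pau'}
--     # Word is a list of phonemes bounded by two word-boundaries
--     word = []
--     for _, _, phoneme in phoneseg:
--         if phoneme.startswith('.'):
--             # A non-phoneme comment starts with a dot
--             # See labeling.pdf found in cd01/docs of the ogi dataset for details
--             if phoneme in word_boundaries and word:
--                 # Word boundary found, finalize new word
--                 yield word
--                 word = []
--             else:
--                 # Do not include non-phonemes
--                 pass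
--         else:
--             # Add phoneme to word
--             word.append(phoneme)
--     if word:
--         yield word
-- ===== SOURCE B (Python) =====
-- def phone_segmentation_to_words(phoneseg):
--     # Pass 1: keep only real phonemes and the '.pau' boundary marker.
--     kept = [ph for _, _, ph in phoneseg if not ph.startswith('.') or ph == '.pau']
--     # Pass 2: emit maximal runs of non-boundary tokens (span scanning).
--     i, n = 0, len(kept)
--     while i < n:
--         if kept[i] == '.pau':
--             i += 1
--             continue
--         j = i
--         while j < n and kept[j] != '.pau':
--             j += 1
--         yield kept[i:j]
--         i = j
-- ===== Notes on version B (the rewrite author's own statement) =====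
-- stated objective: alternative
-- what changed: Replaces the stateful accumulator loop (grow a word, flush on boundary, final flush) by a two-pass pipeline: filter the token stream down to phonemes plus '.pau' markers, then split it into maximal '.pau'-free spans with an index scan.
import Mathlib
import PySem

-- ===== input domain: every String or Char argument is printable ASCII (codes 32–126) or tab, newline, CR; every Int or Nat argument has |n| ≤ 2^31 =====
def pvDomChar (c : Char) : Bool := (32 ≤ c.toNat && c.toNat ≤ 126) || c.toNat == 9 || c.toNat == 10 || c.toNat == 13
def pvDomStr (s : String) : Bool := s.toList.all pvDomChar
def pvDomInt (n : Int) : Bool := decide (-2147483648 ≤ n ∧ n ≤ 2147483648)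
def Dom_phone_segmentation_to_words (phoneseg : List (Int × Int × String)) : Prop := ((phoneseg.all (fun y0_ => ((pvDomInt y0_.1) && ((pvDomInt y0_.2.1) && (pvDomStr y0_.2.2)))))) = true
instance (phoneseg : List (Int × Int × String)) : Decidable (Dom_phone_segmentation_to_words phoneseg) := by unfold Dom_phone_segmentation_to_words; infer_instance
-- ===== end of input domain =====

-- B replaces A's stateful accumulator loop by a filter pass followed by a span-splitting scan (objective: alternative decomposition, same cost).

-- ===== PORT A =====
-- A is a generator; we port the list of its yielded values: the loop body as a fold step over (word, yielded), then the final flush.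
def pvStepA (st : List String × List (List String)) (t : Int × Int × String) : List String × List (List String) :=
  let phoneme := t.2.2
  if PySem.Str.startswith phoneme "." then
    if phoneme = ".pau" ∧ st.1 ≠ [] then ([], st.2 ++ [st.1]) else st
  else (st.1 ++ [phoneme], st.2)

def phone_segmentation_to_words (phoneseg : List (Int × Int × String)) : List (List String) :=
  let fin := phoneseg.foldl pvStepA ([], [])
  if fin.1 ≠ [] then fin.2 ++ [fin.1] else fin.2

-- ===== PORT B =====
-- B's filter condition: keep real phonemes and the '.pau' boundary marker.
def pvKeep (ph : String) : Bool := !PySem.Str.startswith ph "." || ph = ".pau"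

-- B's index scan over `kept`: skip a '.pau', else take the maximal '.pau'-free span and recurse past it.
def pvSplitWords : List String → List (List String)
  | [] => []
  | ph :: ks =>
    if ph = ".pau" then pvSplitWords ks
    else (ph :: ks.takeWhile (· ≠ ".pau")) :: pvSplitWords (ks.dropWhile (· ≠ ".pau"))
termination_by ks => ks.length
decreasing_by
  all_goals simp only [List.length_cons]
  all_goals exact Nat.lt_succ_of_le (by first | exact le_refl _ | exact List.length_dropWhile_le _ _)

def phone_segmentation_to_words_alt (phoneseg : List (Int × Int × String)) : List (List String) :=
  pvSplitWords ((phoneseg.map (fun t => t.2.2)).filter pvKeep)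

-- ===== PRECONDITION & SPEC =====
def Spec_phone_segmentation_to_words (phoneseg : List (Int × Int × String)) (out : List (List String)) : Prop := out = phone_segmentation_to_words_alt phoneseg
instance (phoneseg : List (Int × Int × String)) (out : List (List String)) : Decidable (Spec_phone_segmentation_to_words phoneseg out) := by unfold Spec_phone_segmentation_to_words; infer_instance

-- ===== CLAIM (what is proved, stated in full; the proofs are below) =====
def Claim_equal_phone_segmentation_to_words : Prop := ∀ (phoneseg : List (Int × Int × String)), Dom_phone_segmentation_to_words phoneseg → Spec_phone_segmentation_to_words phoneseg (phone_segmentation_to_words phoneseg)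

-- ===== LEMMAS AND PROOFS =====

-- abstract version of A's loop result from a pending word over an already-filtered stream
def pvGrow : List String → List String → List (List String)
  | word, [] => if word = [] then [] else [word]
  | word, ph :: ks =>
    if ph = ".pau" then (if word = [] then pvGrow [] ks else word :: pvGrow [] ks)
    else pvGrow (word ++ [ph]) ks

theorem pvGrow_eq (ks : List String) : ∀ word,
    pvGrow word ks = if word = [] then pvSplitWords ks
      else (word ++ ks.takeWhile (· ≠ ".pau")) :: pvSplitWords (ks.dropWhile (· ≠ ".pau")) := by
  induction ks with
  | nil => intro word; by_cases h : word = [] <;> simp [pvGrow, pvSplitWords, h]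
  | cons ph ks ih =>
    intro word
    by_cases hp : ph = ".pau"
    · by_cases h : word = [] <;>
        simp [pvGrow, pvSplitWords, hp, h, ih, List.takeWhile, List.dropWhile]
    · by_cases h : word = [] <;>
        simp [pvGrow, pvSplitWords, hp, h, ih, List.takeWhile, List.dropWhile]

theorem pvStepA_pau (st : List String × List (List String)) (t : Int × Int × String)
    (h : t.2.2 = ".pau") :
    pvStepA st t = if st.1 ≠ [] then ([], st.2 ++ [st.1]) else st := by
  have hst : PySem.Chars.startswith ['.', 'p', 'a', 'u'] ['.'] = true := by decide
  simp [pvStepA, h, hst]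

theorem pvStepA_dot (st : List String × List (List String)) (t : Int × Int × String)
    (hs : PySem.Str.startswith t.2.2 "." = true) (hp : t.2.2 ≠ ".pau") :
    pvStepA st t = st := by
  simp at hs
  simp [pvStepA, hs, hp]

theorem pvStepA_ph (st : List String × List (List String)) (t : Int × Int × String)
    (hs : ¬ PySem.Str.startswith t.2.2 "." = true) :
    pvStepA st t = (st.1 ++ [t.2.2], st.2) := by
  simp at hs
  simp [pvStepA, hs]

theorem pvKeep_pau : pvKeep ".pau" = true := by decide

theorem pvKeep_dot (ph : String) (hs : PySem.Str.startswith ph "." = true) (hp : ph ≠ ".pau") :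
    pvKeep ph = false := by
  simp at hs
  simp [pvKeep, hs, hp]

theorem pvKeep_ph (ph : String) (hs : ¬ PySem.Str.startswith ph "." = true) :
    pvKeep ph = true := by
  simp at hs
  simp [pvKeep, hs]

theorem main_fold (l : List (Int × Int × String)) : ∀ (word : List String) (acc : List (List String)),
    (let fin := l.foldl pvStepA (word, acc)
     if fin.1 ≠ [] then fin.2 ++ [fin.1] else fin.2)
    = acc ++ pvGrow word ((l.map (fun t => t.2.2)).filter pvKeep) := by
  induction l with
  | nil =>
    intro word acc
    by_cases h : word = [] <;> simp [pvGrow, h]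
  | cons t l ih =>
    intro word acc
    simp only [List.foldl_cons, List.map_cons, List.filter_cons]
    by_cases hs : PySem.Str.startswith t.2.2 "." = true
    · by_cases hp : t.2.2 = ".pau"
      · rw [pvStepA_pau _ _ hp, hp, pvKeep_pau]
        by_cases hw : word = []
        · simpa [hw, pvGrow] using ih word acc
        · simpa [hw, pvGrow] using ih [] (acc ++ [word])
      · rw [pvStepA_dot _ _ hs hp, pvKeep_dot _ hs hp]
        simpa using ih word acc
    · have hp : t.2.2 ≠ ".pau" := by
        intro h; exact hs (by rw [h]; decide)
      rw [pvStepA_ph _ _ hs, pvKeep_ph _ hs]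
      simpa [pvGrow, hp] using ih (word ++ [t.2.2]) acc

-- ===== VERDICT (by name: the statement is the Claim_ definition above) =====
theorem phone_segmentation_to_words_spec : Claim_equal_phone_segmentation_to_words := by
  intro phoneseg _
  show _ = _
  simpa [phone_segmentation_to_words, phone_segmentation_to_words_alt, pvGrow_eq]
    using main_fold phoneseg [] []
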